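-- pv_equiv track=rewrite | github.com/rlorigro/runlength_analysis | measure_runlength_from_bam.py | count_runlength_per_character
-- ===== SOURCE A (Python) =====
-- from collections import defaultdict, Counter
--
-- def count_runlength_per_character(sequence):
--     """
--     For each observed character, append observed runlengths of that character to a list in a dictionary with key=char
--     :param sequence:
--     :return:
--     """
--     character_count_distributions = defaultdict(lambda: defaultdict(int))
--     current_length = 0
--     current_character = None
--
--     for character in sequence:
--         if character != current_character and current_character is not None:
--             character_count_distributions[current_character][current_length] += 1
--             current_length = 1
--         else:
--             current_length += 1
--
--         current_character = character
--
--     character_count_distributions[current_character][current_length] += 1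
--
--     return character_count_distributions
-- ===== SOURCE B (Python) =====
-- def count_runlength_per_character(sequence):
--     """
--     Boundary-index reformulation: first compute the cut positions where the
--     character changes (by comparing adjacent pairs), then derive each run's
--     character from the run start and its length as the difference of
--     consecutive cuts, tallying into a plain nested dict.
--     """
--     pairs = list(zip(sequence, sequence[1:]))
--     starts = [sequence[0]] + [y for x, y in pairs if x != y]
--     cuts = [0] + [i for i, (x, y) in enumerate(pairs, 1) if x != y] + [len(sequence)]
--     distributions = {}
--     for ch, begin, end in zip(starts, cuts, cuts[1:]):
--         inner = distributions.setdefault(ch, {})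
--         inner[end - begin] = inner.get(end - begin, 0) + 1
--     return distributions
-- ===== Notes on version B (the rewrite author's own statement) =====
-- stated objective: alternative
-- what changed: Replaces A's single-pass current_character/current_length state machine by a staged boundary-index computation: cut positions where adjacent characters differ are listed first (zip of the string with its shift), then each run's character comes from the run start and its length is the difference of consecutive cuts.
-- outside the precondition, e.g. on count_runlength_per_character(''): A returns {None: {0: 1}}, B raises IndexError
import Mathlib
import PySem

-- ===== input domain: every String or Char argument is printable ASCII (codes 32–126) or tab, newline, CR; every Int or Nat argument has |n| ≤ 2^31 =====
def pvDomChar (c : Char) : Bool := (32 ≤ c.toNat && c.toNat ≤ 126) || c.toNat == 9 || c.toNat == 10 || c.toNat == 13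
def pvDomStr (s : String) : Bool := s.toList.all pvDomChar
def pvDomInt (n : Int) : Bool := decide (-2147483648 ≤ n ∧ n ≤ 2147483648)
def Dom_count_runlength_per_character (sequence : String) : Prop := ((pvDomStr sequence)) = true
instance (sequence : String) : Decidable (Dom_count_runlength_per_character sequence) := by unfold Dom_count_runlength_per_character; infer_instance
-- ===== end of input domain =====

-- B replaces A's manual current_character/current_length state machine by a staged,
-- boundary-index computation: cut positions where adjacent characters differ are listed
-- first, then each run's length is the difference of consecutive cuts.

-- ===== PORT A =====
-- character_count_distributions[cc][len] += 1  (defaultdict of defaultdict(int))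
def pvRecordA (d : PySem.Dict String (PySem.Dict Int Int)) (cc : String) (len : Int) :
    PySem.Dict String (PySem.Dict Int Int) :=
  d.insert cc ((d.getD cc PySem.Dict.empty).modify len 0 (· + 1))

-- one iteration of A's for-loop; state = (dist, current_length, current_character)
def pvStepA (st : PySem.Dict String (PySem.Dict Int Int) × Int × Option Char) (character : Char) :
    PySem.Dict String (PySem.Dict Int Int) × Int × Option Char :=
  match st with
  | (dist, len, cur) =>
    match cur with
    | none => (dist, len + 1, some character)      -- 'and current_character is not None' fails
    | some cc =>
      if character ≠ cc then (pvRecordA dist (String.ofList [cc]) len, 1, some character)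
      else (dist, len + 1, some character)

def count_runlength_per_character (sequence : String) : List (String × List (Int × Int)) :=
  match sequence.toList.foldl pvStepA (PySem.Dict.empty, 0, none) with
  | (dist, len, cur) =>
    (match cur with
     | some cc => pvRecordA dist (String.ofList [cc]) len
     -- Python records at key None here ({None: {0: 1}}): not a value of the declared
     -- dict[str, …] type, excluded by Pre_; the port leaves dist unchanged.
     | none => dist).items.map (fun p : String × PySem.Dict Int Int => (p.1, p.2.items))

-- ===== PORT B =====
-- [y for x, y in pairs if x != y]
def pvNewChars : List (Char × Char) → List Char
  | [] => []
  | (x, y) :: rest => if x ≠ y then y :: pvNewChars rest else pvNewChars rest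

-- [i for i, (x, y) in enumerate(pairs, k) if x != y]
def pvBnd : List (Char × Char) → Int → List Int
  | [], _ => []
  | (x, y) :: rest, k => if x ≠ y then k :: pvBnd rest (k + 1) else pvBnd rest (k + 1)

-- inner = distributions.setdefault(ch, {}); inner[n] = inner.get(n, 0) + 1
def pvRecordB (d : PySem.Dict String (PySem.Dict Int Int)) (ch : Char) (n : Int) :
    PySem.Dict String (PySem.Dict Int Int) :=
  let k := String.ofList [ch]
  let inner := d.getD k PySem.Dict.empty
  d.insert k (inner.insert n (inner.getD n 0 + 1))

def count_runlength_per_character_alt (sequence : String) : List (String × List (Int × Int)) :=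
  let pairs := sequence.toList.zip (PySem.List.slice sequence.toList (some 1) none)
  match PySem.Str.pyGet? sequence 0 with
  -- sequence[0] raises IndexError on the empty string — excluded by Pre_
  | none => []
  | some c0 =>
    let starts : List Char := c0 :: pvNewChars pairs
    let cuts : List Int := 0 :: (pvBnd pairs 1 ++ [PySem.Str.len sequence])
    let trips := starts.zip (cuts.zip (PySem.List.slice cuts (some 1) none))
    (trips.foldl (fun d t => pvRecordB d t.1 (t.2.2 - t.2.1)) PySem.Dict.empty).items.map
      (fun p : String × PySem.Dict Int Int => (p.1, p.2.items))

-- ===== PRECONDITION & SPEC =====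
-- Pre_ excludes only the empty string, on which A returns {None: {0: 1}} — a None key,
-- not a value of the declared dict[str, dict[int, int]] type; B raises IndexError there.
def Pre_count_runlength_per_character (sequence : String) : Prop := sequence ≠ ""
instance (sequence : String) : Decidable (Pre_count_runlength_per_character sequence) := by unfold Pre_count_runlength_per_character; infer_instance
def pvWitness_count_runlength_per_character : String := "aabba"

def Spec_count_runlength_per_character (sequence : String) (out : List (String × List (Int × Int))) : Prop := out = count_runlength_per_character_alt sequence
instance (sequence : String) (out : List (String × List (Int × Int))) : Decidable (Spec_count_runlength_per_character sequence out) := by unfold Spec_count_runlength_per_character; infer_instance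

-- ===== CLAIM (what is proved, stated in full; the proofs are below) =====
def Claim_equal_count_runlength_per_character : Prop := ∀ (sequence : String), Dom_count_runlength_per_character sequence → Pre_count_runlength_per_character sequence → Spec_count_runlength_per_character sequence (count_runlength_per_character sequence)

-- ===== LEMMAS AND PROOFS =====

-- the runs of a character list, as (char, length) pairs (proof-only characterisation)
def pvRunsAux (c : Char) (n : Int) : List Char → List (Char × Int)
  | [] => [(c, n)]
  | d :: ds => if d = c then pvRunsAux c (n + 1) ds else (c, n) :: pvRunsAux d 1 ds

-- A's record and B's record do the same dict update
lemma recordA_eq_recordB (d : PySem.Dict String (PySem.Dict Int Int)) (c : Char) (n : Int) :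
    pvRecordA d (String.ofList [c]) n = pvRecordB d c n := by
  simp [pvRecordA, pvRecordB, PySem.Dict.modify]

-- finish A's loop: record the pending run
def pvFinish (st : PySem.Dict String (PySem.Dict Int Int) × Int × Option Char) :
    PySem.Dict String (PySem.Dict Int Int) :=
  match st with
  | (dist, len, some cc) => pvRecordA dist (String.ofList [cc]) len
  | (dist, _, none) => dist

-- A-side invariant: the state machine, finished off, tallies exactly the runs
lemma stepA_runsAux (l : List Char) : ∀ (dist : PySem.Dict String (PySem.Dict Int Int)) (c : Char) (n : Int),
    pvFinish (l.foldl pvStepA (dist, n, some c))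
      = (pvRunsAux c n l).foldl (fun d r => pvRecordB d r.1 r.2) dist := by
  induction l with
  | nil => intro dist c n; simp [pvRunsAux, pvFinish, recordA_eq_recordB]
  | cons d ds ih =>
    intro dist c n
    by_cases h : d = c
    · subst h; simp [pvRunsAux, pvStepA, List.foldl_cons, ih]
    · simp [pvRunsAux, pvStepA, h, List.foldl_cons, ih, recordA_eq_recordB]

-- B's zip3 of (run chars, cuts, cuts[1:]) reduced to (char, length) pairs
def pvTrips : List Char → List Int → List (Char × Int)
  | ch :: chs, a :: b :: rest => (ch, b - a) :: pvTrips chs (b :: rest)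
  | _, _ => []

-- B's fold over the zipped triples is a fold over pvTrips
lemma foldTrips (chs : List Char) : ∀ (cuts : List Int) (d : PySem.Dict String (PySem.Dict Int Int)),
    (chs.zip (cuts.zip cuts.tail)).foldl (fun d t => pvRecordB d t.1 (t.2.2 - t.2.1)) d
      = (pvTrips chs cuts).foldl (fun d r => pvRecordB d r.1 r.2) d := by
  induction chs with
  | nil => intro cuts d; simp [pvTrips]
  | cons ch chs ih =>
    intro cuts d
    match cuts with
    | [] => simp [pvTrips]
    | [a] => simp [pvTrips]
    | a :: b :: rest =>
      simp only [List.tail_cons, List.zip_cons_cons, List.foldl_cons, pvTrips]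
      exact ih (b :: rest) _

-- B-side invariant: the boundary cuts of a pending run (started at cut a, next pair index k)
-- reproduce exactly the runs
lemma bnd_runsAux (cs : List Char) : ∀ (c : Char) (k a : Int),
    pvTrips (c :: pvNewChars ((c :: cs).zip cs))
            (a :: (pvBnd ((c :: cs).zip cs) k ++ [k + (cs.length : Int)]))
      = pvRunsAux c (k - a) cs := by
  induction cs with
  | nil => intro c k a; simp [pvNewChars, pvBnd, pvTrips, pvRunsAux]
  | cons d ds ih =>
    intro c k a
    have h1 : k + ((d :: ds).length : Int) = (k + 1) + (ds.length : Int) := by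
      simp only [List.length_cons]; push_cast; ring
    by_cases h : d = c
    · subst h
      have hdd : (d ≠ d) = False := by simp
      simp only [List.zip_cons_cons, pvNewChars, pvBnd, hdd, if_false, h1]
      rw [ih d (k + 1) a]
      have h2 : k + 1 - a = k - a + 1 := by ring
      simp [pvRunsAux, h2]
    · have hcd : (c ≠ d) = True := eq_true (fun hh => h hh.symm)
      simp only [List.zip_cons_cons, pvNewChars, pvBnd, hcd, if_true, h1, List.cons_append]
      simp only [pvTrips]
      rw [ih d (k + 1) k]
      have h2 : k + 1 - k = (1 : Int) := by ring
      rw [h2]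
      simp [pvRunsAux, h]

-- ===== VERDICT (by name: the statement is the Claim_ definition above) =====
theorem count_runlength_per_character_spec : Claim_equal_count_runlength_per_character := by
  intro sequence _ hpre
  unfold Pre_count_runlength_per_character at hpre
  unfold Spec_count_runlength_per_character
  unfold count_runlength_per_character count_runlength_per_character_alt
  have hne : sequence.toList ≠ [] := by
    exact fun h => hpre (String.toList_eq_nil_iff.mp h)
  obtain ⟨c, cs, hl⟩ := List.exists_cons_of_ne_nil hne
  -- B side: head, pairs, cuts
  have hget : PySem.Str.pyGet? sequence 0 = some c := by
    simp [PySem.Str.pyGet?, hl, PySem.Chars.pyGet?_eq_listPyGet?]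
  have hslice : PySem.List.slice sequence.toList (some 1) none = cs := by
    rw [PySem.List.slice_from_one, hl]; rfl
  have hlen : PySem.Str.len sequence = 1 + (cs.length : Int) := by
    simp [PySem.Str.len_eq, hl]; ring
  -- A side: run the loop
  have h0 : sequence.toList.foldl pvStepA (PySem.Dict.empty, 0, none)
      = cs.foldl pvStepA (PySem.Dict.empty, 1, some c) := by
    rw [hl]; simp [List.foldl_cons, pvStepA]
  rw [h0]
  have hA := stepA_runsAux cs PySem.Dict.empty c 1
  rcases hst : cs.foldl pvStepA (PySem.Dict.empty, 1, some c) with ⟨dist, len, cur⟩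
  rw [hst] at hA
  -- B side rewrite
  rw [hget, hslice, hl, hlen]
  have hB := foldTrips (c :: pvNewChars ((c :: cs).zip cs))
      (0 :: (pvBnd ((c :: cs).zip cs) 1 ++ [1 + (cs.length : Int)])) PySem.Dict.empty
  simp only [List.tail_cons] at hB
  have hB2 : List.foldl (fun d t => pvRecordB d t.1 (t.2.2 - t.2.1)) PySem.Dict.empty
      ((c :: pvNewChars ((c :: cs).zip cs)).zip
        ((0 :: (pvBnd ((c :: cs).zip cs) 1 ++ [1 + (cs.length : Int)])).zip
          (pvBnd ((c :: cs).zip cs) 1 ++ [1 + (cs.length : Int)])))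
      = List.foldl (fun d r => pvRecordB d r.1 r.2) PySem.Dict.empty (pvRunsAux c 1 cs) := by
    rw [hB, bnd_runsAux cs c 1 0]; norm_num
  simp only [PySem.List.slice_from_one, List.tail_cons]
  rw [hB2]
  cases cur with
  | none =>
    simp [pvFinish] at hA
    simp [hA]
  | some cc =>
    simp [pvFinish] at hA
    simp [hA]
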